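-- pv_equiv track=rewrite | github.com/Alena-Storozhenko1/Python-self-education | task4(cor.).py | time_to_boil
-- ===== SOURCE A (Python) =====
-- def time_to_boil(initial_temperature):
--     if not isinstance(initial_temperature, int):
--         raise ValueError("Initial temperature must be an integer.")
--
--     if initial_temperature < 0:
--         raise ValueError("Initial temperature must be non-negative.")
--
--     if initial_temperature >= 100:
--         return 0
--
--     time = 0
--     while initial_temperature < 100:
--         initial_temperature += 1
--         time += 2
--
--     return time
-- ===== SOURCE B (Python) =====
-- def time_to_boil(initial_temperature):
--     if not isinstance(initial_temperature, int):
--         raise ValueError("Initial temperature must be an integer.")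
--     if initial_temperature < 0:
--         raise ValueError("Initial temperature must be non-negative.")
--     if initial_temperature >= 100:
--         return 0
--     return 2 * (100 - initial_temperature)
-- ===== Notes on version B (the rewrite author's own statement) =====
-- stated objective: simpler
-- what changed: Replaced the counting while-loop with the closed form 2*(100 - T) (0 when T >= 100), keeping the validation guards.
import Mathlib
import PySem

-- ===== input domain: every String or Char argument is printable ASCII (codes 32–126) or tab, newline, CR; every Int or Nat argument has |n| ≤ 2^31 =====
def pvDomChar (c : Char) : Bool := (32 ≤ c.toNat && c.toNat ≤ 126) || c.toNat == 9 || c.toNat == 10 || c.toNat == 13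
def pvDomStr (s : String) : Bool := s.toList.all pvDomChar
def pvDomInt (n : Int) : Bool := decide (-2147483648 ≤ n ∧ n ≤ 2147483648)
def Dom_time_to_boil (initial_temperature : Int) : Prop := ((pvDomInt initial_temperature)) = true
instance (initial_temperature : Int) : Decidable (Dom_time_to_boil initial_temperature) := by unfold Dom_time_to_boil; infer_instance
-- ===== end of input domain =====

-- B replaces A's counting while-loop with the closed form 2*(100 - T): simpler, one arithmetic step.


-- ===== PORT A =====
-- the 'while initial_temperature < 100' loop of A, step for step
def boilLoop (t time : Int) : Int :=
  if t < 100 then boilLoop (t + 1) (time + 2) else time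
termination_by (100 - t).toNat
decreasing_by omega

def time_to_boil (initial_temperature : Int) : Int :=
  if initial_temperature ≥ 100 then 0
  else boilLoop initial_temperature 0

-- ===== PORT B =====
def time_to_boil_alt (initial_temperature : Int) : Int :=
  if initial_temperature ≥ 100 then 0
  else 2 * (100 - initial_temperature)

-- ===== PRECONDITION & SPEC =====
-- Pre_ excludes negative temperatures, on which Python A raises ValueError.
def Pre_time_to_boil (initial_temperature : Int) : Prop := 0 ≤ initial_temperature
instance (initial_temperature : Int) : Decidable (Pre_time_to_boil initial_temperature) := by unfold Pre_time_to_boil; infer_instance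
def pvWitness_time_to_boil : Int := (25)

def Spec_time_to_boil (initial_temperature : Int) (out : Int) : Prop := out = time_to_boil_alt initial_temperature
instance (initial_temperature : Int) (out : Int) : Decidable (Spec_time_to_boil initial_temperature out) := by unfold Spec_time_to_boil; infer_instance

-- ===== CLAIM (what is proved, stated in full; the proofs are below) =====
def Claim_equal_time_to_boil : Prop := ∀ (initial_temperature : Int), Dom_time_to_boil initial_temperature → Pre_time_to_boil initial_temperature → Spec_time_to_boil initial_temperature (time_to_boil initial_temperature)

-- ===== LEMMAS AND PROOFS =====
theorem boilLoop_closed (t time : Int) (h : t < 100) : boilLoop t time = time + 2 * (100 - t) := by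
  rw [boilLoop]
  by_cases h1 : t + 1 < 100
  · rw [if_pos h, boilLoop_closed (t + 1) (time + 2) h1]; ring
  · rw [if_pos h, boilLoop, if_neg h1]; omega
termination_by (100 - t).toNat
decreasing_by omega

-- ===== VERDICT (by name: the statement is the Claim_ definition above) =====
theorem time_to_boil_spec : Claim_equal_time_to_boil := by
  intro t _ _
  unfold Spec_time_to_boil time_to_boil time_to_boil_alt
  by_cases h : t ≥ 100
  · simp [h]
  · rw [if_neg h, if_neg h, boilLoop_closed t 0 (by omega)]; ring
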